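-- pv_equiv track=rewrite | github.com/lucas-test/clustering-vs | src/utils.py | assignation_from_clusters
-- ===== SOURCE A (Python) =====
-- def assignation_from_clusters(clusters):
--     vertices = set()
--     for cluster in clusters:
--         for v  in cluster:
--             if v not in vertices:
--                 vertices.add(v)
--
--     assignation = {}
--     for v in vertices:
--         assignation[v] = []
--         for i,cluster in enumerate(clusters):
--             if v in cluster:
--                 assignation[v].append(i)
--     return assignation
-- ===== SOURCE B (Python) =====
-- def assignation_from_clusters(clusters):
--     assignation = {}
--     for i, cluster in enumerate(clusters):
--         for v in dict.fromkeys(cluster):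
--             assignation.setdefault(v, []).append(i)
--     return assignation
-- ===== Notes on version B (the rewrite author's own statement) =====
-- stated objective: faster
-- what changed: A first collects the vertex set and then rescans every cluster once per vertex; B makes a single pass over the clusters, appending each cluster index to the lists of that cluster's (first-occurrence-deduplicated) members via dict.setdefault.
import Mathlib
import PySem

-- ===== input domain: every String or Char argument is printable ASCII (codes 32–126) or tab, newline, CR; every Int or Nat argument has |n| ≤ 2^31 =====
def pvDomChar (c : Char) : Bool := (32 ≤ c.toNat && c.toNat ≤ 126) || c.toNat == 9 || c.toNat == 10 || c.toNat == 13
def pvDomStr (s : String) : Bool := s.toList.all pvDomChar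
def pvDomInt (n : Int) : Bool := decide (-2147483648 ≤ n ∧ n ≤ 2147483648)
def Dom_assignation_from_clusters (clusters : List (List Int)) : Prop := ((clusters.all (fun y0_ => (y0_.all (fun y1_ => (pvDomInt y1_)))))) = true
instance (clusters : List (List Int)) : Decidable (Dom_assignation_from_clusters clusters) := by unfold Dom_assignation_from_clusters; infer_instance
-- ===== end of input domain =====

-- B replaces A's per-vertex rescan of all clusters by a single pass over the clusters (asymptotically faster).
-- A iterates over a Python set to build the returned dict; its key order is modelled here as first-insertion
-- order (dict outputs are compared as dicts, ignoring order).

-- ===== PORT A =====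
def assignation_from_clusters (clusters : List (List Int)) : List (Int × List Int) :=
  -- vertices = set(); for cluster in clusters: for v in cluster: if v not in vertices: vertices.add(v)
  let vertices : PySem.Set Int := clusters.foldl
    (fun s cluster => cluster.foldl (fun s v => if v ∈ s then s else PySem.Set.add s v) s)
    PySem.Set.empty
  -- assignation = {}; for v in vertices: assignation[v] = []
  --   for i, cluster in enumerate(clusters): if v in cluster: assignation[v].append(i)
  let assignation : PySem.Dict Int (List Int) := vertices.foldl
    (fun d v =>
      (PySem.List.enumerate clusters 0).foldl
        (fun d p => if v ∈ p.2 then d.modify v [] (fun l => l ++ [p.1]) else d)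
        (d.insert v []))
    PySem.Dict.empty
  assignation.items

-- ===== PORT B =====
def assignation_from_clusters_alt (clusters : List (List Int)) : List (Int × List Int) :=
  -- assignation = {}; for i, cluster in enumerate(clusters):
  --   for v in dict.fromkeys(cluster): assignation.setdefault(v, []).append(i)
  let assignation : PySem.Dict Int (List Int) := (PySem.List.enumerate clusters 0).foldl
    (fun d p =>
      (PySem.List.dedup p.2).foldl
        (fun d v => d.modify v [] (fun l => l ++ [p.1]))
        d)
    PySem.Dict.empty
  assignation.items

-- ===== PRECONDITION & SPEC =====
def Spec_assignation_from_clusters (clusters : List (List Int)) (out : List (Int × List Int)) : Prop := out = assignation_from_clusters_alt clusters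
instance (clusters : List (List Int)) (out : List (Int × List Int)) : Decidable (Spec_assignation_from_clusters clusters out) := by unfold Spec_assignation_from_clusters; infer_instance

-- ===== CLAIM (what is proved, stated in full; the proofs are below) =====
def Claim_equal_assignation_from_clusters : Prop := ∀ (clusters : List (List Int)), Dom_assignation_from_clusters clusters → Spec_assignation_from_clusters clusters (assignation_from_clusters clusters)

-- ===== LEMMAS AND PROOFS =====

-- The index list both programs associate to a vertex v: the labels of the enumerated clusters containing v.
def pvJ (v : Int) (cs : List (List Int)) (k : Int) : List Int :=
  ((PySem.List.enumerate cs k).filter (fun p => decide (v ∈ p.2))).map (·.1)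

theorem pvJ_nil (v : Int) (k : Int) : pvJ v [] k = [] := rfl

theorem pvJ_cons (v : Int) (c : List Int) (cs : List (List Int)) (k : Int) :
    pvJ v (c :: cs) k = (if v ∈ c then [k] else []) ++ pvJ v cs (k + 1) := by
  simp only [pvJ, PySem.List.enumerate_cons, List.filter_cons]
  by_cases h : v ∈ c <;> simp [h]

-- A's vertex-collection loop is Set.update with the flattened clusters.
theorem pvVertsA (cs : List (List Int)) (s : PySem.Set Int) :
    cs.foldl (fun s c => c.foldl (fun s v => if v ∈ s then s else PySem.Set.add s v) s) s
      = PySem.Set.update s cs.flatten := by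
  induction cs generalizing s with
  | nil => simp [PySem.Set.update_nil]
  | cons c cs ih =>
    have hinner : ∀ (c : List Int) (s : PySem.Set Int),
        c.foldl (fun s v => if v ∈ s then s else PySem.Set.add s v) s = PySem.Set.update s c := by
      intro c
      induction c with
      | nil => intro s; simp [PySem.Set.update_nil]
      | cons v c ihc =>
        intro s
        rw [PySem.Set.update_cons]
        by_cases hv : v ∈ s
        · simpa [hv, PySem.Set.add_of_mem hv] using ihc (PySem.Set.add s v)
        · simpa [hv] using ihc (PySem.Set.add s v)
    rw [List.foldl_cons, hinner c s, ih (PySem.Set.update s c), List.flatten_cons,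
      PySem.Set.update_append]

-- A's inner enumerate loop only rewrites key v: starting from d.insert v acc it appends the matching labels.
theorem pvInnerA (l : List (Int × List Int)) (d : PySem.Dict Int (List Int)) (v : Int) (acc : List Int) :
    l.foldl (fun d p => if v ∈ p.2 then d.modify v [] (fun l0 => l0 ++ [p.1]) else d) (d.insert v acc)
      = d.insert v (acc ++ (l.filter (fun p => decide (v ∈ p.2))).map (·.1)) := by
  induction l generalizing acc with
  | nil => simp
  | cons p l ih =>
    by_cases h : v ∈ p.2
    · rw [List.foldl_cons]
      have hstep : (if v ∈ p.2 then (d.insert v acc).modify v [] (fun l0 => l0 ++ [p.1])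
            else d.insert v acc) = d.insert v (acc ++ [p.1]) := by
        simp [h, PySem.Dict.modify, PySem.Dict.getD_insert_self, PySem.Dict.insert_insert_self]
      rw [hstep, ih (acc ++ [p.1])]
      simp [h, List.append_assoc]
    · rw [List.foldl_cons]
      have hstep : (if v ∈ p.2 then (d.insert v acc).modify v [] (fun l0 => l0 ++ [p.1])
            else d.insert v acc) = d.insert v acc := by
        simp [h]
      rw [hstep, ih acc]
      simp [h]

-- B's inner loop over a duplicate-free member list: effect on one lookup.
theorem pvInnerB_getD (m : List Int) (hm : m.Nodup) (d : PySem.Dict Int (List Int)) (k v : Int) :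
    (m.foldl (fun d w => d.modify w [] (fun l => l ++ [k])) d).getD v []
      = d.getD v [] ++ (if v ∈ m then [k] else []) := by
  induction m generalizing d with
  | nil => simp
  | cons w m ih =>
    rcases List.nodup_cons.mp hm with ⟨hw, hm'⟩
    by_cases hv : v = w
    · subst hv
      rw [List.foldl_cons, ih hm' (d.modify v [] (fun l => l ++ [k]))]
      simp [PySem.Dict.modify, PySem.Dict.getD_insert_self, hw]
    · rw [List.foldl_cons, ih hm' (d.modify w [] (fun l => l ++ [k]))]
      have hstep : (d.modify w [] (fun l => l ++ [k])).getD v [] = d.getD v [] := by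
        simp only [PySem.Dict.modify]
        exact PySem.Dict.getD_insert_of_ne d _ _ hv
      rw [hstep]
      simp [hv]

-- Deduplicating the argument of Set.update changes nothing.
theorem pvUpdate_dedup (s : PySem.Set Int) (c : List Int) :
    PySem.Set.update s (PySem.List.dedup c) = PySem.Set.update s c := by
  rw [PySem.Set.update_eq_append_filter, PySem.Set.update_eq_append_filter,
    PySem.List.dedup_eq_ofList, PySem.Set.ofList_ofList]

-- B's outer loop: the keys are Set.update with the flattened clusters.
theorem pvKeysB (cs : List (List Int)) (k : Int) (d : PySem.Dict Int (List Int)) :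
    ((PySem.List.enumerate cs k).foldl
        (fun d p => (PySem.List.dedup p.2).foldl (fun d v => d.modify v [] (fun l => l ++ [p.1])) d)
        d).keys
      = PySem.Set.update d.keys cs.flatten := by
  induction cs generalizing k d with
  | nil => simp [PySem.Set.update_nil, PySem.List.enumerate_nil]
  | cons c cs ih =>
    rw [PySem.List.enumerate_cons, List.foldl_cons, ih,
      PySem.Dict.keys_foldl_modify (PySem.List.dedup c) [] (fun _ _ l => l ++ [k]) d,
      pvUpdate_dedup, List.flatten_cons, PySem.Set.update_append]

-- B's outer loop: each lookup accumulates exactly the matching labels.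
theorem pvGetDB (cs : List (List Int)) (k : Int) (d : PySem.Dict Int (List Int)) (v : Int) :
    ((PySem.List.enumerate cs k).foldl
        (fun d p => (PySem.List.dedup p.2).foldl (fun d v => d.modify v [] (fun l => l ++ [p.1])) d)
        d).getD v []
      = d.getD v [] ++ pvJ v cs k := by
  induction cs generalizing k d with
  | nil => simp [PySem.List.enumerate_nil, pvJ_nil]
  | cons c cs ih =>
    rw [PySem.List.enumerate_cons, List.foldl_cons, ih,
      pvInnerB_getD (PySem.List.dedup c) (PySem.List.nodup_dedup c) d k v, pvJ_cons]
    simp [List.append_assoc]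

-- A fold of inserts with distinct fresh keys, starting from the empty dict, lists its key/value pairs.
theorem pvItemsInsertMap (verts : List Int) (f : Int → List Int) (hv : verts.Nodup) :
    (verts.foldl (fun d v => d.insert v (f v)) (PySem.Dict.empty : PySem.Dict Int (List Int))).items
      = verts.map (fun v => (v, f v)) := by
  simpa using PySem.Dict.items_foldl_insert_fresh verts id f PySem.Dict.empty
    (by intro a _; exact PySem.Dict.contains_empty a) (by simpa using hv)

-- Both ports compute the same canonical table.
theorem pvPortA_eq (clusters : List (List Int)) :
    assignation_from_clusters clusters
      = (PySem.Set.ofList clusters.flatten).map (fun v => (v, pvJ v clusters 0)) := by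
  unfold assignation_from_clusters
  rw [pvVertsA clusters PySem.Set.empty]
  have hverts : PySem.Set.update PySem.Set.empty clusters.flatten
      = PySem.Set.ofList clusters.flatten := PySem.Set.update_nil_left _
  rw [hverts]
  have hstep : (fun (d : PySem.Dict Int (List Int)) (v : Int) =>
      (PySem.List.enumerate clusters 0).foldl
        (fun d p => if v ∈ p.2 then d.modify v [] (fun l0 => l0 ++ [p.1]) else d)
        (d.insert v []))
      = fun d v => d.insert v (pvJ v clusters 0) := by
    funext d v
    simpa [pvJ] using pvInnerA (PySem.List.enumerate clusters 0) d v []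
  rw [hstep]
  exact pvItemsInsertMap (PySem.Set.ofList clusters.flatten) (fun v => pvJ v clusters 0)
    (PySem.Set.nodup_ofList _)

theorem pvPortB_eq (clusters : List (List Int)) :
    assignation_from_clusters_alt clusters
      = (PySem.Set.ofList clusters.flatten).map (fun v => (v, pvJ v clusters 0)) := by
  have hkeys' : ((PySem.List.enumerate clusters 0).foldl
      (fun d p => (PySem.List.dedup p.2).foldl (fun d v => d.modify v [] (fun l => l ++ [p.1])) d)
      (PySem.Dict.empty : PySem.Dict Int (List Int))).keys
      = PySem.Set.ofList clusters.flatten := by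
    rw [pvKeysB]
    exact PySem.Set.update_nil_left _
  have hitems : ((PySem.List.enumerate clusters 0).foldl
      (fun d p => (PySem.List.dedup p.2).foldl (fun d v => d.modify v [] (fun l => l ++ [p.1])) d)
      (PySem.Dict.empty : PySem.Dict Int (List Int))).items
      = (PySem.Set.ofList clusters.flatten).map (fun v => (v, pvJ v clusters 0)) := by
    rw [PySem.Dict.items_eq_map_keys _ (hkeys' ▸ PySem.Set.nodup_ofList _) [], hkeys']
    apply List.map_congr_left
    intro v _
    rw [pvGetDB clusters 0 PySem.Dict.empty v]
    simp [PySem.Dict.getD_empty]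
  exact hitems

-- ===== VERDICT (by name: the statement is the Claim_ definition above) =====
theorem assignation_from_clusters_spec : Claim_equal_assignation_from_clusters := by
  intro clusters _
  unfold Spec_assignation_from_clusters
  rw [pvPortA_eq, pvPortB_eq]
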